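-- pv_equiv track=rewrite | github.com/wes3985/NGS_tools | report_coverage_overlap.py | initiate_overlap_dict
-- ===== SOURCE A (Python) =====
-- from itertools import combinations
--
-- def initiate_overlap_dict(SAMPLE_LIST):
--     # Takes a list or a string and converts it into a dict of all combinations, initiates the value of the dict as integer 0
--     if len(SAMPLE_LIST)==1 and type(SAMPLE_LIST)==list:
--         return {SAMPLE_LIST[0]: 0}
--     elif len(SAMPLE_LIST)==0 and type(SAMPLE_LIST)==list:
--         raise Exception('"SAMPLE_LIST" needs to contain samples!')
--     elif type(SAMPLE_LIST) != list:
--         raise Exception('"SAMPLE_LIST" must be a list of length >=1 in the same order as they appear in the depth_file')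
--     else:
--         sample_list=[str(x) for x in SAMPLE_LIST]
--         out={}
--
--         for s in sample_list:
--             out[s]=0
--         for c in range(2,len(sample_list)+1):
--             for s in combinations(sample_list,c):
--                 out[':'.join(s)]=0
--         return out
-- ===== SOURCE B (Python) =====
-- def initiate_overlap_dict(SAMPLE_LIST):
--     # Same guards as A; the general path builds joined keys directly by a
--     # recursive combination generator and dedups with a seen-set + list
--     # instead of overwriting into a dict.
--     if len(SAMPLE_LIST) == 1 and type(SAMPLE_LIST) == list:
--         return {SAMPLE_LIST[0]: 0}
--     elif len(SAMPLE_LIST) == 0 and type(SAMPLE_LIST) == list: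
--         raise Exception('"SAMPLE_LIST" needs to contain samples!')
--     elif type(SAMPLE_LIST) != list:
--         raise Exception('"SAMPLE_LIST" must be a list of length >=1 in the same order as they appear in the depth_file')
--     else:
--         samples = [str(x) for x in SAMPLE_LIST]
--         seen = set()
--         items = []
--         for c in range(1, len(samples) + 1):
--             for key in _combo_keys(c, samples):
--                 if key not in seen:
--                     seen.add(key)
--                     items.append((key, 0))
--         return dict(items)
--
--
-- def _combo_keys(k, samples):
--     # joined ':'-keys of all k-element combinations of samples, in
--     # itertools.combinations order, built as strings directly
--     if k == 1:
--         return list(samples)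
--     if len(samples) < k:
--         return []
--     head, tail = samples[0], samples[1:]
--     return [head + ':' + r for r in _combo_keys(k - 1, tail)] + _combo_keys(k, tail)
-- ===== Notes on version B (the rewrite author's own statement) =====
-- stated objective: alternative
-- what changed: B replaces A's itertools.combinations-of-lists written into an overwriting dict by a recursive generator that builds the ':'-joined key strings directly, deduplicated with a seen-set and an output list.
import Mathlib
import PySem

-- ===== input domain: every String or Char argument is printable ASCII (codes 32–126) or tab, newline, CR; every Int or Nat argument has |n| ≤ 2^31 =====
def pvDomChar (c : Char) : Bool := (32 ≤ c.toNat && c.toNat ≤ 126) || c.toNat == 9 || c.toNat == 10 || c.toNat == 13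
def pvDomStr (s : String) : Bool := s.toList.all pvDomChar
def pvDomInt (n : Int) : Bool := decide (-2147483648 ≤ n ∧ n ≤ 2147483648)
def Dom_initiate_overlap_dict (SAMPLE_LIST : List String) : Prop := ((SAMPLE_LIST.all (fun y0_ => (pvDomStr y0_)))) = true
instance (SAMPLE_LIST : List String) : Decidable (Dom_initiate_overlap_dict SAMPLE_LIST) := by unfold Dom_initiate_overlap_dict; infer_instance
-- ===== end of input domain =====

-- B builds the joined ':'-keys directly by a recursive combination generator and
-- dedups with a seen-set + output list, instead of A's itertools.combinations
-- grouped by size written into an overwriting dict (alternative decomposition,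
-- same asymptotic cost; return values proved equal on nonempty lists).

-- ===== PORT A =====
-- itertools.combinations(xs, k), ported by hand (lexicographic index order, exact)
def pyCombinations : Nat → List String → List (List String)
  | 0, _ => [[]]
  | _ + 1, [] => []
  | k + 1, x :: rest =>
      (pyCombinations k rest).map (fun c => x :: c) ++ pyCombinations (k + 1) rest

def initiate_overlap_dict (SAMPLE_LIST : List String) : List (String × Int) :=
  if SAMPLE_LIST.length = 1 then
    -- return {SAMPLE_LIST[0]: 0}  (index 0 in range since length = 1)
    [(PySem.List.pyGetD SAMPLE_LIST 0 "", 0)]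
  else
    -- (len == 0 raises — excluded by Pre_; the non-list branch cannot arise under the type)
    -- sample_list = [str(x) for x in SAMPLE_LIST]; str on a str is the identity
    let sample_list := SAMPLE_LIST.map (fun x => x)
    let out : PySem.Dict String Int := PySem.Dict.empty
    let out := sample_list.foldl (fun d s => d.insert s 0) out
    let out := (PySem.List.pyRange 2 ((sample_list.length : Int) + 1) 1).foldl
      (fun d c => (pyCombinations c.toNat sample_list).foldl
        (fun d s => d.insert (PySem.Str.join ":" s) 0) d) out
    out.items

-- ===== PORT B =====
-- _combo_keys(k, samples); 'head + ":" + r' ported as join ":" [head, r] (the same concatenation)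
def comboKeys : Nat → List String → List String
  | k, samples =>
    if k = 1 then samples
    else if samples.length < k then []
    else match samples with
      | [] => []
      | x :: rest =>
          ((comboKeys (k - 1) rest).map (fun r => PySem.Str.join ":" [x, r])) ++ comboKeys k rest
  termination_by _ samples => samples.length
  decreasing_by all_goals simp_all

def initiate_overlap_dict_alt (SAMPLE_LIST : List String) : List (String × Int) :=
  if SAMPLE_LIST.length = 1 then
    [(PySem.List.pyGetD SAMPLE_LIST 0 "", 0)]
  else
    let samples := SAMPLE_LIST.map (fun x => x)
    let st : PySem.Set String × List (String × Int) := (PySem.Set.empty, [])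
    let st := (PySem.List.pyRange 1 ((samples.length : Int) + 1) 1).foldl
      (fun st c => (comboKeys c.toNat samples).foldl
        (fun st key =>
          if PySem.Set.contains st.1 key then st
          else (PySem.Set.add st.1 key, st.2 ++ [(key, 0)])) st) st
    st.2

-- ===== PRECONDITION & SPEC =====
-- Pre_ excludes only the empty list, on which A raises Exception
def Pre_initiate_overlap_dict (SAMPLE_LIST : List String) : Prop := SAMPLE_LIST ≠ []
instance (SAMPLE_LIST : List String) : Decidable (Pre_initiate_overlap_dict SAMPLE_LIST) := by unfold Pre_initiate_overlap_dict; infer_instance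
def pvWitness_initiate_overlap_dict : List String := ["a", "b", "c"]

def Spec_initiate_overlap_dict (SAMPLE_LIST : List String) (out : List (String × Int)) : Prop := out = initiate_overlap_dict_alt SAMPLE_LIST
instance (SAMPLE_LIST : List String) (out : List (String × Int)) : Decidable (Spec_initiate_overlap_dict SAMPLE_LIST out) := by unfold Spec_initiate_overlap_dict; infer_instance

-- ===== CLAIM (what is proved, stated in full; the proofs are below) =====
def Claim_equal_initiate_overlap_dict : Prop := ∀ (SAMPLE_LIST : List String), Dom_initiate_overlap_dict SAMPLE_LIST → Pre_initiate_overlap_dict SAMPLE_LIST → Spec_initiate_overlap_dict SAMPLE_LIST (initiate_overlap_dict SAMPLE_LIST)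



-- ===== LEMMAS AND PROOFS =====

-- combinations with more elements than available are empty
theorem pyComb_nil_of_lt : ∀ (xs : List String) (k : Nat), xs.length < k → pyCombinations k xs = [] := by
  intro xs
  induction xs with
  | nil =>
    intro k hk
    match k with
    | k + 1 => rfl
  | cons x rest ih =>
    intro k hk
    match k, hk with
    | k + 1, hk =>
      simp only [List.length_cons] at hk
      simp [pyCombinations, ih k (by omega), ih (k + 1) (by omega)]

-- every member of pyCombinations (k ≥ 1) is nonempty
theorem mem_pyComb_ne_nil : ∀ (xs : List String) (k : Nat) (c : List String), 1 ≤ k → c ∈ pyCombinations k xs → c ≠ [] := by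
  intro xs
  induction xs with
  | nil =>
    intro k c hk hc
    match k, hc with
    | k + 1, hc => simp [pyCombinations] at hc
  | cons x rest ih =>
    intro k c hk hc
    match k, hc with
    | k + 1, hc =>
      simp only [pyCombinations, List.mem_append, List.mem_map] at hc
      rcases hc with ⟨d, _, rfl⟩ | hc
      · simp
      · exact ih (k + 1) c (by omega) hc

theorem pyComb_one : ∀ (xs : List String), pyCombinations 1 xs = xs.map (fun x => [x]) := by
  intro xs
  induction xs with
  | nil => rfl
  | cons x rest ih => simp [pyCombinations, ih]

theorem join_colon_singleton (x : String) : PySem.Str.join ":" [x] = x := by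
  apply String.toList_inj.mp
  simp [PySem.Str.toList_join, PySem.Chars.join_singleton]

theorem join_colon_two (x : String) (c : List String) (hc : c ≠ []) :
    PySem.Str.join ":" [x, PySem.Str.join ":" c] = PySem.Str.join ":" (x :: c) := by
  obtain ⟨y, cs, rfl⟩ := List.exists_cons_of_ne_nil hc
  apply String.toList_inj.mp
  simp [PySem.Str.toList_join, PySem.Chars.join_cons_cons, PySem.Chars.join_singleton]

-- B's key generator produces exactly the ':'-joins of A's combinations (k ≥ 1)
theorem comboKeys_eq : ∀ (xs : List String) (k : Nat), 1 ≤ k →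
    comboKeys k xs = (pyCombinations k xs).map (fun s => PySem.Str.join ":" s) := by
  intro xs
  induction xs with
  | nil =>
    intro k hk
    rw [comboKeys]
    match k with
    | 1 => rfl
    | k + 2 => rfl
  | cons x rest ih =>
    intro k hk
    rw [comboKeys]
    by_cases h1 : k = 1
    · subst h1
      rw [if_pos rfl, pyComb_one, List.map_map]
      simp only [Function.comp_def]
      rw [List.map_congr_left (g := fun a => a) (fun a _ => join_colon_singleton a), List.map_id']
    · rw [if_neg h1]
      by_cases h2 : (x :: rest).length < k
      · rw [if_pos h2, pyComb_nil_of_lt _ _ h2, List.map_nil]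
      · rw [if_neg h2]
        match k, h1 with
        | k + 2, _ =>
          simp only [pyCombinations, List.map_append, List.map_map,
            show k + 2 - 1 = k + 1 from rfl]
          rw [ih (k + 1) (by omega), ih (k + 2) (by omega), List.map_map]
          congr 1
          apply List.map_congr_left
          intro c hcmem
          simp only [Function.comp_apply]
          exact join_colon_two x c (mem_pyComb_ne_nil rest (k + 1) c (by omega) hcmem)

-- the dict-insert loop and B's seen-set/output-list loop keep the same state
theorem loop_pair : ∀ (ks : List String) (d : PySem.Dict String Int),
    (∀ p ∈ d.items, p.2 = (0 : Int)) →
    ks.foldl (fun st key => if PySem.Set.contains st.1 key then st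
        else (PySem.Set.add st.1 key, st.2 ++ [(key, (0 : Int))])) (d.keys, d.items)
      = ((ks.foldl (fun d s => d.insert s 0) d).keys, (ks.foldl (fun d s => d.insert s 0) d).items) := by
  intro ks
  induction ks with
  | nil => intro d _; rfl
  | cons k rest ih =>
    intro d hz
    simp only [List.foldl_cons]
    by_cases hc : d.contains k = true
    · have hmem : k ∈ d.keys := (PySem.Dict.contains_iff_mem_keys d k).mp hc
      have hset : PySem.Set.contains d.keys k = true := (PySem.Set.contains_iff d.keys k).mpr hmem
      have hins : d.insert k 0 = d := by
        apply PySem.Dict.ext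
        rw [PySem.Dict.items_insert_of_contains d 0 hc]
        nth_rewrite 2 [← List.map_id d.items]
        apply List.map_congr_left
        intro p hp
        by_cases hpk : p.1 == k
        · have h1 : p.1 = k := by simpa using hpk
          have h2 := hz p hp
          cases p
          simp_all
        · simp [hpk]
      rw [if_pos hset, hins]
      exact ih d hz
    · have hcf : d.contains k = false := by
        cases h : d.contains k
        · rfl
        · exact absurd h hc
      have hnm : k ∉ d.keys := fun h => hc ((PySem.Dict.contains_iff_mem_keys d k).mpr h)
      have hset : PySem.Set.contains d.keys k = false := by
        cases h : PySem.Set.contains d.keys k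
        · rfl
        · exact absurd ((PySem.Set.contains_iff d.keys k).mp h) hnm
      rw [if_neg (by rw [hset]; exact Bool.false_ne_true)]
      have hkeys : (d.insert k 0).keys = d.keys ++ [k] :=
        PySem.Dict.keys_insert_of_not_contains d 0 hcf
      have hitems : (d.insert k 0).items = d.items ++ [(k, (0 : Int))] :=
        PySem.Dict.items_insert_of_not_contains d 0 hcf
      have hadd : PySem.Set.add d.keys k = d.keys ++ [k] := by
        simp [PySem.Set.add, hnm]
      have hz' : ∀ p ∈ (d.insert k 0).items, p.2 = (0 : Int) := by
        intro p hp
        rw [hitems] at hp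
        rcases List.mem_append.mp hp with hp | hp
        · exact hz p hp
        · simp at hp; simp [hp]
      have h := ih (d.insert k 0) hz'
      rw [hadd, ← hkeys, ← hitems]
      exact h

-- ===== VERDICT (by name: the statement is the Claim_ definition above) =====
theorem initiate_overlap_dict_spec : Claim_equal_initiate_overlap_dict := by
  intro L _ hpre
  unfold Spec_initiate_overlap_dict initiate_overlap_dict initiate_overlap_dict_alt
  by_cases hl : L.length = 1
  · rw [if_pos hl, if_pos hl]
  · rw [if_neg hl, if_neg hl]
    simp only []
    have hmap : L.map (fun x => x) = L := List.map_id' L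
    rw [hmap]
    have hn : 2 ≤ L.length := by
      rcases L with _ | ⟨a, _ | ⟨b, t⟩⟩
      · exact absurd rfl hpre
      · exact absurd rfl hl
      · simp only [List.length_cons]
        omega
    -- rewrite A's inner loops as insert-folds over the joined key lists
    have hA : ∀ (d : PySem.Dict String Int) (c : Int),
        (pyCombinations c.toNat L).foldl (fun d s => d.insert (PySem.Str.join ":" s) 0) d
          = ((pyCombinations c.toNat L).map (fun s => PySem.Str.join ":" s)).foldl
              (fun d s => d.insert s 0) d := by
      intro d c
      rw [List.foldl_map]
    simp only [hA]
    -- flatten both nested loops into single folds over flat key sequences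
    rw [← List.foldl_flatMap, ← List.foldl_flatMap, ← List.foldl_append]
    -- the two flat key sequences coincide
    have hkeys : (PySem.List.pyRange 1 ((L.length : Int) + 1)).flatMap (fun c => comboKeys c.toNat L)
        = L ++ (PySem.List.pyRange 2 ((L.length : Int) + 1)).flatMap
            (fun c => (pyCombinations c.toNat L).map (fun s => PySem.Str.join ":" s)) := by
      rw [PySem.List.pyRange_one_cons (a := 1) (b := (L.length : Int) + 1) (by omega),
        List.flatMap_cons]
      congr 1
      · show comboKeys 1 L = L
        rw [comboKeys.eq_def]
        rfl
      · apply List.flatMap_congr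
        intro c hc
        have hcb := (PySem.List.mem_pyRange_one
          (a := 2) (b := (L.length : Int) + 1) (x := c)).mp hc
        exact comboKeys_eq L c.toNat (by omega)
    rw [hkeys]
    -- both sides are now the same loop body over the same key list
    have h0 : ∀ p ∈ (PySem.Dict.empty : PySem.Dict String Int).items, p.2 = (0 : Int) := by
      intro p hp
      simp [PySem.Dict.empty] at hp
    have h := loop_pair
      (L ++ (PySem.List.pyRange 2 ((L.length : Int) + 1)).flatMap
        (fun c => (pyCombinations c.toNat L).map (fun s => PySem.Str.join ":" s)))
      PySem.Dict.empty h0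
    calc _ = _ := (congrArg Prod.snd h).symm
    _ = _ := rfl
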